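-- pv_equiv track=rewrite | github.com/AdamZhouSE/pythonHomework | Code/CodeRecords/2356/60760/272912.py | func
-- ===== SOURCE A (Python) =====
-- def func(arr:list):
--     lengtn=len(arr)
--     need=-1
--     for i in range(2,lengtn):
--         arr1=arr[0:i]
--         arr2=arr[i-1:lengtn]
--         if max(arr1)==min(arr2) and max(arr1)==arr[i-1]:
--             need=arr[i-1]
--             break
--     return need
-- ===== SOURCE B (Python) =====
-- def func(arr: list):
--     n = len(arr)
--     if n < 3:
--         return -1
--     # suffix minima: suf[j] = min(arr[j:]), built right-to-left in one pass
--     suf = [0] * n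
--     suf[n - 1] = arr[n - 1]
--     for j in range(n - 2, -1, -1):
--         suf[j] = arr[j] if arr[j] < suf[j + 1] else suf[j + 1]
--     # single left-to-right pass with a running prefix maximum
--     pm = arr[0]
--     for j in range(1, n - 1):
--         if arr[j] > pm:
--             pm = arr[j]
--         if pm == arr[j] and suf[j] == arr[j]:
--             return arr[j]
--     return -1
-- ===== Notes on version B (the rewrite author's own statement) =====
-- stated objective: faster
-- what changed: A re-slices the list and recomputes max/min of both halves at every pivot candidate; B precomputes a suffix-minimum array once and keeps a running prefix maximum, deciding each candidate in O(1).
import Mathlib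
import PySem

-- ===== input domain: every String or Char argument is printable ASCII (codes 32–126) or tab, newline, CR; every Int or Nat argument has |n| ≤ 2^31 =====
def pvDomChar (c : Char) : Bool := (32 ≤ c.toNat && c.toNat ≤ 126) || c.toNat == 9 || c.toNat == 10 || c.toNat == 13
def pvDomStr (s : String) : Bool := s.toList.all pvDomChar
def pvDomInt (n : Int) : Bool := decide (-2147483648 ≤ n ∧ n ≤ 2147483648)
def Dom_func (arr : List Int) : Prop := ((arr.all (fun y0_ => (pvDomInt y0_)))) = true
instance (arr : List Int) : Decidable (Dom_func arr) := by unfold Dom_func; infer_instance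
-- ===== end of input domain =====

-- B replaces A's quadratic slice/max/min per position by a precomputed suffix-minimum
-- array plus a running prefix maximum (objective: faster, asymptotic).

-- ===== PORT A =====
-- A's for-loop with break, over i in range(2, len(arr)); each iteration slices and
-- scans the whole list.  The `_ , _ , _` catch-all is unreachable: for i in the range
-- both slices are nonempty and index i-1 is in range, so max/min/get never fail.
def funcLoopA (arr : List Int) (n : Int) : List Int → Int
  | [] => -1
  | i :: rest =>
    let arr1 := PySem.List.slice arr (some 0) (some i)
    let arr2 := PySem.List.slice arr (some (i - 1)) (some n)
    match PySem.List.max? arr1 (fun y => y), PySem.List.min? arr2 (fun y => y),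
          PySem.List.pyGet? arr (i - 1) with
    | some M, some m, some a => if M = m ∧ M = a then a else funcLoopA arr n rest
    | _, _, _ => funcLoopA arr n rest

def func (arr : List Int) : Int :=
  let lengtn : Int := arr.length
  funcLoopA arr lengtn (PySem.List.pyRange 2 lengtn 1)

-- ===== PORT B =====
-- Source B's right-to-left array fill `suf[j] = arr[j] if arr[j] < suf[j+1] else suf[j+1]`
-- transliterated as a right-to-left structural recursion producing the same list.
def sufMinB : List Int → List Int
  | [] => []
  | x :: rest =>
    match sufMinB rest with
    | [] => [x]
    | m :: s => (if x < m then x else m) :: m :: s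

-- Source B's forward loop over j in range(1, n-1) reading (arr[j], suf[j]), carrying pm.
def altLoopB (pm : Int) : List (Int × Int) → Int
  | [] => -1
  | (a, s) :: rest =>
    let pm' := if a > pm then a else pm
    if pm' = a ∧ s = a then a else altLoopB pm' rest

def func_alt (arr : List Int) : Int :=
  match arr with
  | [] => -1
  | [_] => -1
  | [_, _] => -1
  | x :: rest =>
    altLoopB x ((rest.zip (sufMinB (x :: rest)).tail).dropLast)

-- ===== PRECONDITION & SPEC =====
def Spec_func (arr : List Int) (out : Int) : Prop := out = func_alt arr
instance (arr : List Int) (out : Int) : Decidable (Spec_func arr out) := by unfold Spec_func; infer_instance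

-- ===== CLAIM (what is proved, stated in full; the proofs are below) =====
def Claim_equal_func : Prop := ∀ (arr : List Int), Dom_func arr → Spec_func arr (func arr)

-- ===== LEMMAS AND PROOFS =====

lemma foldl_min_min (t : List Int) : ∀ a b : Int, t.foldl min (min a b) = min a (t.foldl min b) := by
  induction t with
  | nil => intro a b; simp
  | cons c t ih => intro a b; simp only [List.foldl_cons, min_assoc, ih]

lemma sufMinB_eq (a : Int) (t : List Int) :
    sufMinB (a :: t) = (t.foldl min a) :: sufMinB t := by
  induction t generalizing a with
  | nil => rfl
  | cons b t ih =>
    conv_lhs => rw [sufMinB, ih b]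
    rw [ih b]
    simp only [List.foldl_cons]
    congr 1
    rw [foldl_min_min t a b, min_def]
    split_ifs <;> omega

lemma main_loop (p : Int) : ∀ (suffix ps : List Int),
    funcLoopA ((p :: ps) ++ suffix) (((p :: ps) ++ suffix).length : Int)
      (PySem.List.pyRange ((ps.length : Int) + 2) (((p :: ps) ++ suffix).length : Int) 1)
    = altLoopB (ps.foldl max p) ((suffix.zip (sufMinB suffix)).dropLast) := by
  intro suffix
  induction suffix with
  | nil =>
    intro ps
    rw [PySem.List.pyRange_one_eq_nil
      (by simp only [List.length_append, List.length_cons, List.length_nil]; push_cast; omega)]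
    simp [funcLoopA, altLoopB]
  | cons a s ih =>
    intro ps
    cases s with
    | nil =>
      rw [PySem.List.pyRange_one_eq_nil
        (by simp only [List.length_append, List.length_cons, List.length_nil]; push_cast; omega)]
      simp [funcLoopA, sufMinB, altLoopB]
    | cons b t =>
      -- one genuine iteration: i = ps.length + 2, j = i - 1 = (p :: ps).length
      rw [PySem.List.pyRange_one_cons
        (by simp only [List.length_append, List.length_cons, List.length_nil]; push_cast; omega)]
      simp only [funcLoopA]
      have hj : ((ps.length : Int) + 2) - 1 = ((ps.length + 1 : ℕ) : Int) := by push_cast; ring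
      -- arr1 = (p :: ps) ++ [a]
      have harr1 : PySem.List.slice ((p :: ps) ++ a :: b :: t) (some 0) (some ((ps.length : Int) + 2))
          = (p :: ps) ++ [a] := by
        have h2 : ((ps.length : Int) + 2) = ((ps.length + 2 : ℕ) : Int) := by push_cast; ring
        rw [h2, PySem.List.slice_zero_start, PySem.List.slice_to_natCast]
        have h3 : ps.length + 2 = (p :: ps).length + 1 := by simp
        rw [h3, List.take_append]
        simp [List.take_of_length_le]
      -- arr2 = a :: b :: t
      have harr2 : PySem.List.slice ((p :: ps) ++ a :: b :: t)
            (some (((ps.length : Int) + 2) - 1)) (some (((p :: ps) ++ a :: b :: t).length : Int))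
          = a :: b :: t := by
        rw [hj, PySem.List.slice_natCast]
        have h1 : ps.length + 1 = (p :: ps).length := by simp
        rw [h1, List.drop_left]
        apply List.take_of_length_le
        simp
      -- arr[i-1] = a
      have hget : PySem.List.pyGet? ((p :: ps) ++ a :: b :: t) (((ps.length : Int) + 2) - 1) = some a := by
        rw [hj]
        have h1 : ((ps.length + 1 : ℕ) : Int) = ((p :: ps).length : Int) := by simp
        rw [h1, PySem.List.pyGet?_append_length]
      rw [harr1, harr2, hget]
      rw [show (p :: ps) ++ [a] = p :: (ps ++ [a]) from rfl]
      rw [PySem.List.max?_id_cons, PySem.List.min?_id_cons]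
      -- B side: expose the first pair (a, min of the whole suffix)
      rw [sufMinB_eq a (b :: t)]
      have hzip : ((a :: b :: t).zip (((b :: t).foldl min a) :: sufMinB (b :: t))).dropLast
          = (a, (b :: t).foldl min a) :: (((b :: t).zip (sufMinB (b :: t))).dropLast) := by
        rw [sufMinB_eq b t]
        rfl
      rw [hzip]
      simp only [altLoopB]
      have hpm : (ps ++ [a]).foldl max p = max (ps.foldl max p) a := by
        rw [List.foldl_append]; rfl
      have hpm' : (if a > ps.foldl max p then a else ps.foldl max p) = max (ps.foldl max p) a := by
        rw [max_def]; split_ifs <;> omega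
      rw [hpm, hpm']
      by_cases hc : max (ps.foldl max p) a = (b :: t).foldl min a ∧ max (ps.foldl max p) a = a
      · rw [if_pos hc, if_pos (show _ ∧ _ from ⟨hc.2, by omega⟩)]
      · rw [if_neg hc, if_neg (by rintro ⟨h1, h2⟩; exact hc ⟨by omega, h1⟩)]
        have hIH := ih (ps ++ [a])
        rw [hpm] at hIH
        have harr : (p :: ps) ++ a :: b :: t = (p :: (ps ++ [a])) ++ b :: t := by simp
        have hidx : ((ps.length : Int) + 2) + 1 = (((ps ++ [a]).length : Int)) + 2 := by
          simp only [List.length_append, List.length_cons, List.length_nil]; push_cast; ring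
        rw [harr, hidx]
        exact hIH

-- ===== VERDICT (by name: the statement is the Claim_ definition above) =====
theorem func_spec : Claim_equal_func := by
  intro arr _
  unfold Spec_func func func_alt
  match arr with
  | [] => rfl
  | [x] => rfl
  | [x, y] => rfl
  | x :: a :: b :: t =>
    have h := main_loop x (a :: b :: t) []
    simp only [List.length_nil, Nat.cast_zero, zero_add] at h
    show funcLoopA (x :: a :: b :: t) ((x :: a :: b :: t).length : Int)
        (PySem.List.pyRange 2 ((x :: a :: b :: t).length : Int) 1)
      = altLoopB x (((a :: b :: t).zip ((sufMinB (x :: a :: b :: t)).tail)).dropLast)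
    rw [sufMinB_eq x (a :: b :: t)]
    exact h
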